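-- pv_equiv track=rewrite | github.com/lenhan1803044/CTDL | python_ctdl/buoi4/6_10.py | bfs
-- ===== SOURCE A (Python) =====
-- from collections import deque
--
-- def bfs(R, C, grid):
--     queue = deque()
--     # Khởi tạo queue với các cây non và đánh dấu chúng đã được xử lý
--     for i in range(R):
--         for j in range(C):
--             if grid[i][j] == 2:
--                 queue.append((i, j, 0))  # (x, y, ngày)
--
--     # Mảng di chuyển (trái, phải, trên, dưới)
--     directions = [(-1, 0), (1, 0), (0, -1), (0, 1)]
--
--     # Thực hiện BFS
--     max_days = 0  # Lưu số ngày tối đa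
--     while queue:
--         x, y, days = queue.popleft()
--
--         # Duyệt qua tất cả các hướng
--         for dx, dy in directions:
--             nx, ny = x + dx, y + dy
--             # Kiểm tra xem vị trí (nx, ny) có hợp lệ và là hạt mầm chưa nảy mầm
--             if 0 <= nx < R and 0 <= ny < C and grid[nx][ny] == 1:
--                 grid[nx][ny] = 2  # Đánh dấu hạt đã nảy mầm
--                 queue.append((nx, ny, days + 1))
--                 max_days = max(max_days, days + 1)
--
--     # Kiểm tra xem có còn hạt mầm nào chưa nảy mầm không
--     for i in range(R):
--         for j in range(C):
--             if grid[i][j] == 1: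
--                 return -1  # Nếu có hạt chưa nảy mầm, trả về -1
--
--     return max_days
-- ===== SOURCE B (Python) =====
-- def bfs(R, C, grid):
--     # Coordinate-set flood fill: no grid mutation (A marks sprouted cells in
--     # grid in place; equivalence is about the return value only).
--     ones = {(i, j) for i in range(R) for j in range(C) if grid[i][j] == 1}
--     frontier = [(i, j) for i in range(R) for j in range(C) if grid[i][j] == 2]
--     days = 0
--     while True:
--         nxt = []
--         for x, y in frontier:
--             for nb in ((x - 1, y), (x + 1, y), (x, y - 1), (x, y + 1)):
--                 if nb in ones:
--                     ones.discard(nb)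
--                     nxt.append(nb)
--         if not nxt:
--             break
--         days += 1
--         frontier = nxt
--     return -1 if ones else days
-- ===== Notes on version B (the rewrite author's own statement) =====
-- stated objective: alternative
-- what changed: Replaces A's deque of (x,y,day) triples with in-place grid marking by a flood fill over a coordinate SET of unsprouted cells: membership/discard on the set replaces bounds checks and grid writes, per-day frontier lists replace the per-cell day counter, and the final answer comes from the set being empty instead of rescanning the grid; B does not mutate grid (A does).
import Mathlib
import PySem

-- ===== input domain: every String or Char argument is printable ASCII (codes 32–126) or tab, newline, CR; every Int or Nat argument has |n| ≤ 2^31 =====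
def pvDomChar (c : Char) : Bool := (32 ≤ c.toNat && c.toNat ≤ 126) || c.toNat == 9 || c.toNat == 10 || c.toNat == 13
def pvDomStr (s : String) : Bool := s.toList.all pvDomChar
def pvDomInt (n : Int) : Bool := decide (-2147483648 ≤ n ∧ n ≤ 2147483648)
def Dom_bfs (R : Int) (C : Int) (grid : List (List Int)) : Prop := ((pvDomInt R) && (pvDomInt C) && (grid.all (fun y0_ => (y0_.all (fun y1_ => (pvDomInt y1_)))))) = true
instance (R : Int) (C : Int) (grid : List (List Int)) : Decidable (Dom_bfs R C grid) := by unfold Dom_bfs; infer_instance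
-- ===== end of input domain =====

-- B replaces A's deque of (x,y,day) triples and in-place grid marking by a flood fill over a coordinate
-- SET of unsprouted cells (ones) with per-day frontiers; A mutates grid in place, B does not: the
-- equivalence proved here is about the return value only.


-- ===== PORT A =====
-- A-side primitive helpers: grid[i][j] read (indices are nonnegative wherever A reads) and write
def pvGG (g : List (List Int)) (i j : Int) : Int :=
  (PySem.List.pyGet? ((PySem.List.pyGet? g i).getD []) j).getD 0

def pvSet (g : List (List Int)) (i j : Int) (v : Int) : List (List Int) :=
  g.set i.toNat ((g.getD i.toNat []).set j.toNat v)

-- number of cells equal to 1 (termination measure only)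
def pvOnes (g : List (List Int)) : Nat :=
  (g.map (fun r => r.countP (fun v => v == 1))).sum

def pvDirs : List (Int × Int) := [(-1, 0), (1, 0), (0, -1), (0, 1)]

-- A's inner `for dx, dy in directions` body: state (grid, queue, max_days)
def pvStepA (R C x y d : Int) (s : List (List Int) × List (Int × Int × Int) × Int)
    (dd : Int × Int) : List (List Int) × List (Int × Int × Int) × Int :=
  if 0 ≤ x + dd.1 ∧ x + dd.1 < R ∧ 0 ≤ y + dd.2 ∧ y + dd.2 < C ∧ pvGG s.1 (x + dd.1) (y + dd.2) = 1
  then (pvSet s.1 (x + dd.1) (y + dd.2) 2, s.2.1 ++ [(x + dd.1, y + dd.2, d + 1)], max s.2.2 (d + 1))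
  else s

theorem rowcount (row : List Int) (m : Nat) (h : m < row.length) (h1 : row[m] = 1) :
    (row.set m 2).countP (fun v => v == 1) + 1 = row.countP (fun v => v == 1) := by
  induction row generalizing m with
  | nil => simp at h
  | cons a t ih =>
    cases m with
    | zero => simp_all
    | succ m =>
      simp only [List.set_cons_succ, List.countP_cons, List.getElem_cons_succ] at *
      have := ih m (by simpa using Nat.lt_of_succ_lt_succ (by simpa using h)) h1
      omega
theorem sumset (l : List Nat) (n : Nat) (a : Nat) (h : n < l.length) :
    (l.set n a).sum + l[n] = l.sum + a := by
  induction l generalizing n with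
  | nil => simp at h
  | cons b t ih =>
    cases n with
    | zero => simp [Nat.add_comm, Nat.add_left_comm]
    | succ n =>
      simp only [List.set_cons_succ, List.sum_cons, List.getElem_cons_succ] at *
      have := ih n (by simpa using Nat.lt_of_succ_lt_succ (by simpa using h))
      omega
theorem pvOnes_set (g : List (List Int)) (i j : Int) (hi : 0 ≤ i) (hj : 0 ≤ j)
    (h1 : pvGG g i j = 1) : pvOnes (pvSet g i j 2) + 1 = pvOnes g := by
  obtain ⟨n, rfl⟩ : ∃ n : Nat, i = (n : Int) := ⟨i.toNat, (Int.toNat_of_nonneg hi).symm⟩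
  obtain ⟨m, rfl⟩ : ∃ m : Nat, j = (m : Int) := ⟨j.toNat, (Int.toNat_of_nonneg hj).symm⟩
  simp only [pvGG, PySem.List.pyGet?_natCast] at h1
  by_cases hn : n < g.length
  · by_cases hm : m < (g[n]).length
    · have hrow : g[n]? = some g[n] := List.getElem?_eq_getElem hn
      have hcell : g[n][m] = 1 := by
        simpa [hrow, List.getElem?_eq_getElem hm] using h1
      simp only [pvSet, pvOnes, Int.toNat_natCast, List.map_set, List.getD_eq_getElem?_getD, hrow]
      have hs := sumset (g.map (fun r => r.countP (fun v => v == 1))) n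
        ((g[n].set m 2).countP (fun v => v == 1)) (by simpa using hn)
      have hr := rowcount g[n] m hm hcell
      simp only [List.getElem_map] at hs
      simp only [Option.getD_some]
      omega
    · exfalso
      have : g[n]?.getD [] = g[n] := by simp [List.getElem?_eq_getElem hn]
      rw [this] at h1
      rw [List.getElem?_eq_none (by omega)] at h1
      simp at h1
  · exfalso
    have hnone : g[n]? = none := List.getElem?_eq_none (by omega)
    simp [hnone] at h1

theorem pvStepA_ones (R C x y d : Int) : ∀ (ds : List (Int × Int))
    (g : List (List Int)) (q : List (Int × Int × Int)) (m : Int),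
    pvOnes (ds.foldl (pvStepA R C x y d) (g, q, m)).1 +
      ((ds.foldl (pvStepA R C x y d) (g, q, m)).2.1).length = pvOnes g + q.length := by
  intro ds
  induction ds with
  | nil => intro g q m; rfl
  | cons dd ds ih =>
    intro g q m
    by_cases hc : 0 ≤ x + dd.1 ∧ x + dd.1 < R ∧ 0 ≤ y + dd.2 ∧ y + dd.2 < C ∧ pvGG g (x + dd.1) (y + dd.2) = 1
    · have hset := pvOnes_set g (x + dd.1) (y + dd.2) hc.1 hc.2.2.1 hc.2.2.2.2
      simp only [List.foldl_cons]
      rw [show pvStepA R C x y d (g, q, m) dd = (pvSet g (x + dd.1) (y + dd.2) 2, q ++ [(x + dd.1, y + dd.2, d + 1)], max m (d+1)) from by simp [pvStepA, hc]]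
      have := ih (pvSet g (x + dd.1) (y + dd.2) 2) (q ++ [(x + dd.1, y + dd.2, d + 1)]) (max m (d+1))
      simp only [List.length_append, List.length_cons, List.length_nil] at this ⊢
      omega
    · simp only [List.foldl_cons]
      rw [show pvStepA R C x y d (g, q, m) dd = (g, q, m) from by simp [pvStepA, hc]]
      exact ih g q m

theorem pvStepA_len (R C x y d : Int) : ∀ (ds : List (Int × Int))
    (g : List (List Int)) (q : List (Int × Int × Int)) (m : Int),
    q.length ≤ ((ds.foldl (pvStepA R C x y d) (g, q, m)).2.1).length := by
  intro ds
  induction ds with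
  | nil => intro g q m; exact le_refl _
  | cons dd ds ih =>
    intro g q m
    by_cases hc : 0 ≤ x + dd.1 ∧ x + dd.1 < R ∧ 0 ≤ y + dd.2 ∧ y + dd.2 < C ∧ pvGG g (x + dd.1) (y + dd.2) = 1
    · simp only [List.foldl_cons]
      rw [show pvStepA R C x y d (g, q, m) dd = (pvSet g (x + dd.1) (y + dd.2) 2, q ++ [(x + dd.1, y + dd.2, d + 1)], max m (d+1)) from by simp [pvStepA, hc]]
      have := ih (pvSet g (x + dd.1) (y + dd.2) 2) (q ++ [(x + dd.1, y + dd.2, d + 1)]) (max m (d+1))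
      simp only [List.length_append, List.length_cons, List.length_nil] at this
      omega
    · simp only [List.foldl_cons]
      rw [show pvStepA R C x y d (g, q, m) dd = (g, q, m) from by simp [pvStepA, hc]]
      exact ih g q m

-- A's `while queue` loop (queue, grid, max_days); returns (max_days, final grid)
def bfsLoop (R C : Int) (q : List (Int × Int × Int)) (g : List (List Int)) (m : Int) :
    Int × List (List Int) :=
  match q with
  | [] => (m, g)
  | (x, y, d) :: rest =>
      let r := pvDirs.foldl (pvStepA R C x y d) (g, rest, m)
      bfsLoop R C r.2.1 r.1 r.2.2
termination_by q.length + 2 * pvOnes g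
decreasing_by
  have h := pvStepA_ones R C x y d pvDirs g rest m
  have h2 := pvStepA_len R C x y d pvDirs g rest m
  simp only [List.length_cons] at *
  omega

-- seed queue: nested `for i in range(R): for j in range(C): if grid[i][j] == 2: queue.append((i,j,0))`
def pvSeedsA (R C : Int) (grid : List (List Int)) : List (Int × Int × Int) :=
  (PySem.List.pyRange 0 R 1).foldl (fun acc i =>
    (PySem.List.pyRange 0 C 1).foldl (fun acc2 j =>
      if pvGG grid i j = 2 then acc2 ++ [(i, j, 0)] else acc2) acc) []

def bfs (R : Int) (C : Int) (grid : List (List Int)) : Int :=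
  let r := bfsLoop R C (pvSeedsA R C grid) grid 0
  if (PySem.List.pyRange 0 R 1).any (fun i =>
       (PySem.List.pyRange 0 C 1).any (fun j => pvGG r.2 i j == 1))
  then -1 else r.1

-- ===== PORT B =====
-- B never touches the grid after initialisation: it keeps the SET `ones` of unsprouted coordinates
-- and absorbs neighbours of the frontier out of it, one day-layer at a time.
def pvNbrs (x y : Int) : List (Int × Int) := [(x - 1, y), (x + 1, y), (x, y - 1), (x, y + 1)]

-- B's `if nb in ones: ones.discard(nb); nxt.append(nb)` step: state (ones, nxt)
def pvAbsorb (s : List (Int × Int) × List (Int × Int)) (nb : Int × Int) :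
    List (Int × Int) × List (Int × Int) :=
  if PySem.Set.contains s.1 nb then (PySem.Set.discard s.1 nb, s.2 ++ [nb]) else s

-- B's `for x, y in frontier` layer body
def pvLayerB (f : List (Int × Int)) (s : List (Int × Int) × List (Int × Int)) :
    List (Int × Int) × List (Int × Int) :=
  f.foldl (fun s p => (pvNbrs p.1 p.2).foldl pvAbsorb s) s

theorem pvAbsorb_len : ∀ (qs : List (Int × Int)) (o n : List (Int × Int)),
    ((qs.foldl pvAbsorb (o, n)).1).length + ((qs.foldl pvAbsorb (o, n)).2).length ≤
      o.length + n.length := by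
  intro qs
  induction qs with
  | nil => intro o n; exact le_refl _
  | cons q qs ih =>
    intro o n
    by_cases hq : q ∈ o
    · have hlt : (PySem.Set.discard o q).length < o.length := by
        refine List.length_filter_lt_length_iff_exists.mpr ⟨q, hq, by simp⟩
      simp only [List.foldl_cons]
      rw [show pvAbsorb (o, n) q = (PySem.Set.discard o q, n ++ [q]) from by simp [pvAbsorb, hq]]
      have := ih (PySem.Set.discard o q) (n ++ [q])
      simp only [List.length_append, List.length_cons, List.length_nil] at this
      omega
    · simp only [List.foldl_cons]
      rw [show pvAbsorb (o, n) q = (o, n) from by simp [pvAbsorb, hq]]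
      exact ih o n

theorem pvLayerB_len : ∀ (f : List (Int × Int)) (s : List (Int × Int) × List (Int × Int)),
    ((pvLayerB f s).1).length + ((pvLayerB f s).2).length ≤ s.1.length + s.2.length := by
  intro f
  induction f with
  | nil => intro s; exact le_refl _
  | cons p f ih =>
    intro s
    obtain ⟨o, n⟩ := s
    simp only [pvLayerB, List.foldl_cons]
    have h1 := pvAbsorb_len (pvNbrs p.1 p.2) o n
    have h2 := ih ((pvNbrs p.1 p.2).foldl pvAbsorb (o, n))
    simp only [pvLayerB] at h2
    omega

-- B's `while True` loop: absorb a layer; if nothing sprouted, answer now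
def bfsAltLoop (ones f : List (Int × Int)) (days : Int) : Int :=
  let r := pvLayerB f (ones, [])
  if h : r.2 = [] then (if r.1 = [] then days else -1)
  else bfsAltLoop r.1 r.2 (days + 1)
termination_by ones.length
decreasing_by
  have h1 := pvLayerB_len f (ones, [])
  have h2 : 0 < ((pvLayerB f (ones, [])).2).length := List.length_pos_iff.mpr h
  simp only [List.length_nil] at h1
  omega

-- `ones = {(i, j) ... if grid[i][j] == 1}` set comprehension
def pvOnesInit (R C : Int) (grid : List (List Int)) : List (Int × Int) :=
  (PySem.List.pyRange 0 R 1).foldl (fun acc i =>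
    (PySem.List.pyRange 0 C 1).foldl (fun acc2 j =>
      if pvGG grid i j = 1 then PySem.Set.add acc2 (i, j) else acc2) acc) []

-- frontier comprehension `[(i, j) ... if grid[i][j] == 2]`
def pvSeedsB (R C : Int) (grid : List (List Int)) : List (Int × Int) :=
  (PySem.List.pyRange 0 R 1).foldl (fun acc i =>
    (PySem.List.pyRange 0 C 1).foldl (fun acc2 j =>
      if pvGG grid i j = 2 then acc2 ++ [(i, j)] else acc2) acc) []

def bfs_alt (R : Int) (C : Int) (grid : List (List Int)) : Int :=
  bfsAltLoop (pvOnesInit R C grid) (pvSeedsB R C grid) 0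

-- ===== PRECONDITION & SPEC =====
-- Pre_ excludes exactly the inputs on which Python A raises IndexError: R, C both positive but the
-- grid has fewer than R rows, or one of the first R rows is shorter than C.
def Pre_bfs (R : Int) (C : Int) (grid : List (List Int)) : Prop :=
  0 < R → 0 < C →
    R ≤ (grid.length : Int) ∧ ∀ row ∈ grid.take R.toNat, C ≤ (row.length : Int)
instance (R : Int) (C : Int) (grid : List (List Int)) : Decidable (Pre_bfs R C grid) := by
  unfold Pre_bfs; infer_instance

def pvWitness_bfs : Int × Int × List (List Int) := (2, 2, [[2, 1], [0, 1]])

def Spec_bfs (R : Int) (C : Int) (grid : List (List Int)) (out : Int) : Prop := out = bfs_alt R C grid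
instance (R : Int) (C : Int) (grid : List (List Int)) (out : Int) : Decidable (Spec_bfs R C grid out) := by unfold Spec_bfs; infer_instance

-- ===== CLAIM (what is proved, stated in full; the proofs are below) =====
def Claim_equal_bfs : Prop := ∀ (R : Int) (C : Int) (grid : List (List Int)), Dom_bfs R C grid → Pre_bfs R C grid → Spec_bfs R C grid (bfs R C grid)

-- ===== LEMMAS AND PROOFS =====
-- Proof-side intermediate: the grid-marking LEVEL-order BFS (frontier of (i,j) pairs, grid mutation).
-- Part 1 proves A equal to it; part 2 relates its grid state to B's coordinate set.
def pvGAbs (R C : Int) (s : List (List Int) × List (Int × Int)) (q : Int × Int) :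
    List (List Int) × List (Int × Int) :=
  if 0 ≤ q.1 ∧ q.1 < R ∧ 0 ≤ q.2 ∧ q.2 < C ∧ pvGG s.1 q.1 q.2 = 1
  then (pvSet s.1 q.1 q.2 2, s.2 ++ [q])
  else s

def pvGStep (R C x y : Int) (s : List (List Int) × List (Int × Int)) (dd : Int × Int) :
    List (List Int) × List (Int × Int) :=
  pvGAbs R C s (x + dd.1, y + dd.2)

def pvGLayer (R C : Int) (f : List (Int × Int)) (s : List (List Int) × List (Int × Int)) :
    List (List Int) × List (Int × Int) :=
  f.foldl (fun s p => pvDirs.foldl (pvGStep R C p.1 p.2) s) s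

theorem pvGStep_ones (R C x y : Int) : ∀ (ds : List (Int × Int))
    (g : List (List Int)) (n : List (Int × Int)),
    pvOnes (ds.foldl (pvGStep R C x y) (g, n)).1 +
      ((ds.foldl (pvGStep R C x y) (g, n)).2).length = pvOnes g + n.length := by
  intro ds
  induction ds with
  | nil => intro g n; rfl
  | cons dd ds ih =>
    intro g n
    by_cases hc : 0 ≤ x + dd.1 ∧ x + dd.1 < R ∧ 0 ≤ y + dd.2 ∧ y + dd.2 < C ∧ pvGG g (x + dd.1) (y + dd.2) = 1
    · have hset := pvOnes_set g (x + dd.1) (y + dd.2) hc.1 hc.2.2.1 hc.2.2.2.2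
      simp only [List.foldl_cons]
      rw [show pvGStep R C x y (g, n) dd = (pvSet g (x + dd.1) (y + dd.2) 2, n ++ [(x + dd.1, y + dd.2)]) from by simp [pvGStep, pvGAbs, hc]]
      have := ih (pvSet g (x + dd.1) (y + dd.2) 2) (n ++ [(x + dd.1, y + dd.2)])
      simp only [List.length_append, List.length_cons, List.length_nil] at this ⊢
      omega
    · simp only [List.foldl_cons]
      rw [show pvGStep R C x y (g, n) dd = (g, n) from by simp [pvGStep, pvGAbs, hc]]
      exact ih g n

theorem pvGLayer_ones (R C : Int) : ∀ (f : List (Int × Int))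
    (s : List (List Int) × List (Int × Int)),
    pvOnes (pvGLayer R C f s).1 + ((pvGLayer R C f s).2).length = pvOnes s.1 + s.2.length := by
  intro f
  induction f with
  | nil => intro s; rfl
  | cons p f ih =>
    intro s
    obtain ⟨g, n⟩ := s
    simp only [pvGLayer, List.foldl_cons]
    have h1 := pvGStep_ones R C p.1 p.2 pvDirs g n
    have h2 := ih (pvDirs.foldl (pvGStep R C p.1 p.2) (g, n))
    simp only [pvGLayer] at h2
    omega

def pvGLoop (R C : Int) (f : List (Int × Int)) (g : List (List Int)) (days : Int) :
    Int × List (List Int) :=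
  let r := pvGLayer R C f (g, [])
  if h : r.2 = [] then (days, r.1)
  else pvGLoop R C r.2 r.1 (days + 1)
termination_by pvOnes g
decreasing_by
  have h1 := pvGLayer_ones R C f (g, [])
  have h2 : 0 < ((pvGLayer R C f (g, [])).2).length := List.length_pos_iff.mpr h
  simp only [List.length_nil] at h1
  omega

-- ---- part 1: A's triple-queue BFS equals the grid-level BFS ----
def pvTag (d : Int) (l : List (Int × Int)) : List (Int × Int × Int) :=
  l.map (fun p => (p.1, p.2, d))

theorem foldG_acc (R C x y : Int) : ∀ (ds : List (Int × Int)) (g : List (List Int))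
    (n : List (Int × Int)),
    ds.foldl (pvGStep R C x y) (g, n) =
      ((ds.foldl (pvGStep R C x y) (g, [])).1, n ++ (ds.foldl (pvGStep R C x y) (g, [])).2) := by
  intro ds
  induction ds with
  | nil => intro g n; simp
  | cons dd ds ih =>
    intro g n
    by_cases hc : 0 ≤ x + dd.1 ∧ x + dd.1 < R ∧ 0 ≤ y + dd.2 ∧ y + dd.2 < C ∧ pvGG g (x + dd.1) (y + dd.2) = 1
    · simp only [List.foldl_cons]
      rw [show pvGStep R C x y (g, n) dd = (pvSet g (x + dd.1) (y + dd.2) 2, n ++ [(x + dd.1, y + dd.2)]) from by simp [pvGStep, pvGAbs, hc],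
          show pvGStep R C x y (g, []) dd = (pvSet g (x + dd.1) (y + dd.2) 2, [(x + dd.1, y + dd.2)]) from by simp [pvGStep, pvGAbs, hc]]
      rw [ih (pvSet g (x + dd.1) (y + dd.2) 2) (n ++ [(x + dd.1, y + dd.2)]),
          ih (pvSet g (x + dd.1) (y + dd.2) 2) [(x + dd.1, y + dd.2)]]
      simp
    · simp only [List.foldl_cons]
      rw [show pvGStep R C x y (g, n) dd = (g, n) from by simp [pvGStep, pvGAbs, hc],
          show pvGStep R C x y (g, []) dd = (g, []) from by simp [pvGStep, pvGAbs, hc]]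
      exact ih g n

theorem foldA_charac (R C x y d : Int) : ∀ (ds : List (Int × Int)) (g : List (List Int))
    (q : List (Int × Int × Int)) (m : Int),
    ds.foldl (pvStepA R C x y d) (g, q, m) =
      ((ds.foldl (pvGStep R C x y) (g, [])).1,
       q ++ pvTag (d + 1) (ds.foldl (pvGStep R C x y) (g, [])).2,
       if (ds.foldl (pvGStep R C x y) (g, [])).2 = [] then m else max m (d + 1)) := by
  intro ds
  induction ds with
  | nil => intro g q m; simp [pvTag]
  | cons dd ds ih =>
    intro g q m
    by_cases hc : 0 ≤ x + dd.1 ∧ x + dd.1 < R ∧ 0 ≤ y + dd.2 ∧ y + dd.2 < C ∧ pvGG g (x + dd.1) (y + dd.2) = 1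
    · simp only [List.foldl_cons]
      simp only [show pvStepA R C x y d (g, q, m) dd = (pvSet g (x + dd.1) (y + dd.2) 2, q ++ [(x + dd.1, y + dd.2, d + 1)], max m (d + 1)) from by simp [pvStepA, hc],
          show pvGStep R C x y (g, []) dd = (pvSet g (x + dd.1) (y + dd.2) 2, [(x + dd.1, y + dd.2)]) from by simp [pvGStep, pvGAbs, hc]]
      rw [ih (pvSet g (x + dd.1) (y + dd.2) 2) (q ++ [(x + dd.1, y + dd.2, d + 1)]) (max m (d + 1))]
      simp only [foldG_acc R C x y ds (pvSet g (x + dd.1) (y + dd.2) 2) [(x + dd.1, y + dd.2)]]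
      refine Prod.ext rfl (Prod.ext ?_ ?_)
      · simp [pvTag]
      · by_cases hn : (List.foldl (pvGStep R C x y) (pvSet g (x + dd.1) (y + dd.2) 2, []) ds).2 = []
        · simp [hn]
        · rw [if_neg hn, if_neg (by simp), max_assoc, max_self]
    · simp only [List.foldl_cons]
      simp only [show pvStepA R C x y d (g, q, m) dd = (g, q, m) from by simp [pvStepA, hc],
          show pvGStep R C x y (g, []) dd = (g, []) from by simp [pvGStep, pvGAbs, hc]]
      exact ih g q m

theorem layer_eq (R C d : Int) : ∀ (cur : List (Int × Int)) (g : List (List Int))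
    (acc : List (Int × Int)) (m : Int),
    bfsLoop R C (pvTag d cur ++ pvTag (d + 1) acc) g (if acc = [] then m else max m (d + 1)) =
      bfsLoop R C (pvTag (d + 1) (pvGLayer R C cur (g, acc)).2) (pvGLayer R C cur (g, acc)).1
        (if (pvGLayer R C cur (g, acc)).2 = [] then m else max m (d + 1)) := by
  intro cur
  induction cur with
  | nil =>
    intro g acc m
    show bfsLoop R C (pvTag (d+1) acc) g _ = _
    simp only [pvGLayer, List.foldl_nil]
    rfl
  | cons p cur ih =>
    obtain ⟨x, y⟩ := p
    intro g acc m
    simp only [pvTag, List.map_cons, List.cons_append]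
    rw [bfsLoop]
    rw [foldA_charac R C x y d pvDirs g (List.map (fun p => (p.1, p.2, d)) cur ++ List.map (fun p => (p.1, p.2, d + 1)) acc) (if acc = [] then m else max m (d + 1))]
    have hm : (if (pvDirs.foldl (pvGStep R C x y) (g, [])).2 = [] then (if acc = [] then m else max m (d + 1)) else max (if acc = [] then m else max m (d + 1)) (d + 1))
        = (if acc ++ (pvDirs.foldl (pvGStep R C x y) (g, [])).2 = [] then m else max m (d + 1)) := by
      by_cases ha : acc = [] <;> by_cases hn : (pvDirs.foldl (pvGStep R C x y) (g, [])).2 = [] <;>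
        simp [ha, hn]
    have hq : (List.map (fun p => (p.1, p.2, d)) cur ++ List.map (fun p => (p.1, p.2, d + 1)) acc) ++ pvTag (d + 1) (pvDirs.foldl (pvGStep R C x y) (g, [])).2
        = pvTag d cur ++ pvTag (d + 1) (acc ++ (pvDirs.foldl (pvGStep R C x y) (g, [])).2) := by
      simp [pvTag, List.append_assoc]
    simp only [hm, hq]
    rw [ih (pvDirs.foldl (pvGStep R C x y) (g, [])).1 (acc ++ (pvDirs.foldl (pvGStep R C x y) (g, [])).2) m]
    have hL : pvGLayer R C ((x, y) :: cur) (g, acc)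
        = pvGLayer R C cur ((pvDirs.foldl (pvGStep R C x y) (g, [])).1, acc ++ (pvDirs.foldl (pvGStep R C x y) (g, [])).2) := by
      simp only [pvGLayer, List.foldl_cons]
      rw [foldG_acc R C x y pvDirs g acc]
    rw [hL]
    rfl

theorem main_eq (R C : Int) : ∀ (n : Nat) (g : List (List Int)) (cur : List (Int × Int)) (dd : Int),
    pvOnes g ≤ n → bfsLoop R C (pvTag dd cur) g dd = pvGLoop R C cur g dd := by
  intro n
  induction n using Nat.strong_induction_on with
  | _ n ih =>
    intro g cur dd hle
    have h0 := layer_eq R C dd cur g [] dd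
    simp only [pvTag, List.map_nil, List.append_nil, if_true] at h0
    rw [show List.map (fun p => (p.1, p.2, dd)) cur = pvTag dd cur from rfl] at h0
    rw [h0]
    have hones := pvGLayer_ones R C cur (g, [])
    rw [pvGLoop]
    by_cases hn : (pvGLayer R C cur (g, [])).2 = []
    · rw [if_pos hn, dif_pos hn, hn]
      simp only [List.map_nil]
      rw [bfsLoop]
    · rw [if_neg hn, dif_neg hn]
      have hlen := List.length_pos_iff.mpr hn
      have hlt : pvOnes (pvGLayer R C cur (g, [])).1 < pvOnes g := by
        simp only [List.length_nil] at hones; omega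
      rw [max_eq_right (by omega : dd ≤ dd + 1)]
      exact ih (pvOnes (pvGLayer R C cur (g, [])).1) (by omega)
        (pvGLayer R C cur (g, [])).1 (pvGLayer R C cur (g, [])).2 (dd + 1) (le_refl _)

theorem seeds_inner (grid : List (List Int)) (i : Int) : ∀ (js : List Int) (acc : List (Int × Int)),
    js.foldl (fun a j => if pvGG grid i j = 2 then a ++ [(i, j, 0)] else a) (pvTag 0 acc) =
      pvTag 0 (js.foldl (fun a j => if pvGG grid i j = 2 then a ++ [(i, j)] else a) acc) := by
  intro js
  induction js with
  | nil => intro acc; rfl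
  | cons j js ih =>
    intro acc
    by_cases hc : pvGG grid i j = 2
    · simp only [List.foldl_cons, hc, if_pos]
      rw [show pvTag 0 acc ++ [(i, j, 0)] = pvTag 0 (acc ++ [(i, j)]) from by simp [pvTag]]
      exact ih (acc ++ [(i, j)])
    · simp only [List.foldl_cons, hc, ite_false]
      exact ih acc

theorem seeds_eq (R C : Int) (grid : List (List Int)) :
    pvSeedsA R C grid = pvTag 0 (pvSeedsB R C grid) := by
  simp only [pvSeedsA, pvSeedsB]
  generalize (PySem.List.pyRange 0 R 1) = is
  suffices h : ∀ (is : List Int) (acc : List (Int × Int)),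
      is.foldl (fun acc i => (PySem.List.pyRange 0 C 1).foldl
        (fun a j => if pvGG grid i j = 2 then a ++ [(i, j, 0)] else a) acc) (pvTag 0 acc) =
      pvTag 0 (is.foldl (fun acc i => (PySem.List.pyRange 0 C 1).foldl
        (fun a j => if pvGG grid i j = 2 then a ++ [(i, j)] else a) acc) acc) by
    exact h is []
  intro is
  induction is with
  | nil => intro acc; rfl
  | cons i is ih =>
    intro acc
    simp only [List.foldl_cons]
    rw [seeds_inner grid i (PySem.List.pyRange 0 C 1) acc]
    exact ih _

-- ---- part 2: the grid-level BFS equals B's coordinate-set flood fill ----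
-- the state relation: o holds exactly the in-window coordinates whose grid cell is 1
def pvRel (R C : Int) (g : List (List Int)) (o : List (Int × Int)) : Prop :=
  ∀ p : Int × Int, p ∈ o ↔ (0 ≤ p.1 ∧ p.1 < R ∧ 0 ≤ p.2 ∧ p.2 < C ∧ pvGG g p.1 p.2 = 1)

theorem pvGG_set (g : List (List Int)) (i j a b : Int) (hi : 0 ≤ i) (hj : 0 ≤ j)
    (ha : 0 ≤ a) (hb : 0 ≤ b) (h1 : pvGG g i j = 1) :
    pvGG (pvSet g i j 2) a b = if a = i ∧ b = j then 2 else pvGG g a b := by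
  obtain ⟨n, rfl⟩ : ∃ n : Nat, i = (n : Int) := ⟨i.toNat, (Int.toNat_of_nonneg hi).symm⟩
  obtain ⟨m, rfl⟩ : ∃ m : Nat, j = (m : Int) := ⟨j.toNat, (Int.toNat_of_nonneg hj).symm⟩
  obtain ⟨p, rfl⟩ : ∃ p : Nat, a = (p : Int) := ⟨a.toNat, (Int.toNat_of_nonneg ha).symm⟩
  obtain ⟨q, rfl⟩ : ∃ q : Nat, b = (q : Int) := ⟨b.toNat, (Int.toNat_of_nonneg hb).symm⟩
  by_cases hn : n < g.length
  swap
  · exfalso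
    simp only [pvGG, PySem.List.pyGet?_natCast] at h1
    rw [show g[n]? = none from List.getElem?_eq_none (by omega)] at h1
    simp at h1
  by_cases hm : m < (g[n]).length
  swap
  · exfalso
    have hgd : g[n]?.getD [] = g[n] := by simp [List.getElem?_eq_getElem hn]
    simp only [pvGG, PySem.List.pyGet?_natCast] at h1
    rw [hgd, List.getElem?_eq_none (by omega)] at h1
    simp at h1
  have hrow : g[n]? = some g[n] := List.getElem?_eq_getElem hn
  have hset : pvSet g (n : Int) (m : Int) 2 = g.set n (g[n].set m 2) := by
    simp [pvSet, List.getD_eq_getElem?_getD, hrow]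
  simp only [pvGG, PySem.List.pyGet?_natCast, hset]
  rw [List.getElem?_set]
  by_cases hp : n = p
  · subst hp
    rw [if_pos rfl, if_pos hn]
    simp only [Option.getD_some]
    rw [List.getElem?_set]
    by_cases hq : m = q
    · subst hq
      rw [if_pos rfl, if_pos hm]
      simp
    · rw [if_neg hq]
      have hqm : ¬((q : Int) = (m : Int)) := by
        intro hx
        have hqm' : q = m := by exact_mod_cast hx
        exact hq hqm'.symm
      simp [hrow, hqm]
  · rw [if_neg hp]
    have hpn : ¬((p : Int) = (n : Int)) := by
      intro hx
      have hpn' : p = n := by exact_mod_cast hx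
      exact hp hpn'.symm
    simp [hpn]

theorem rel_step (R C : Int) (g : List (List Int)) (o : List (Int × Int)) (q : Int × Int)
    (hrel : pvRel R C g o) (hq : q ∈ o) :
    pvRel R C (pvSet g q.1 q.2 2) (PySem.Set.discard o q) := by
  obtain ⟨hq1, hq2, hq3, hq4, hq5⟩ := (hrel q).mp hq
  intro p
  simp only [PySem.Set.discard, List.mem_filter, Bool.not_eq_eq_eq_not, Bool.not_true,
    beq_eq_false_iff_ne, ne_eq]
  constructor
  · rintro ⟨hp, hne⟩
    obtain ⟨h1, h2, h3, h4, h5⟩ := (hrel p).mp hp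
    refine ⟨h1, h2, h3, h4, ?_⟩
    rw [pvGG_set g q.1 q.2 p.1 p.2 hq1 hq3 h1 h3 hq5]
    have : ¬(p.1 = q.1 ∧ p.2 = q.2) := by
      intro hx; exact hne (Prod.ext hx.1 hx.2)
    simp [this, h5]
  · rintro ⟨h1, h2, h3, h4, h5⟩
    rw [pvGG_set g q.1 q.2 p.1 p.2 hq1 hq3 h1 h3 hq5] at h5
    by_cases hpq : p = q
    · subst hpq; simp at h5
    · have : ¬(p.1 = q.1 ∧ p.2 = q.2) := by
        intro hx; exact hpq (Prod.ext hx.1 hx.2)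
      rw [if_neg this] at h5
      exact ⟨(hrel p).mpr ⟨h1, h2, h3, h4, h5⟩, hpq⟩

theorem fold_abs_corr (R C : Int) : ∀ (qs : List (Int × Int)) (g : List (List Int))
    (o n : List (Int × Int)), pvRel R C g o →
    pvRel R C ((qs.foldl (pvGAbs R C) (g, n)).1) ((qs.foldl pvAbsorb (o, n)).1) ∧
      (qs.foldl (pvGAbs R C) (g, n)).2 = (qs.foldl pvAbsorb (o, n)).2 := by
  intro qs
  induction qs with
  | nil => intro g o n hrel; exact ⟨hrel, rfl⟩
  | cons q qs ih =>
    intro g o n hrel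
    by_cases hq : q ∈ o
    · have hc := (hrel q).mp hq
      simp only [List.foldl_cons]
      rw [show pvGAbs R C (g, n) q = (pvSet g q.1 q.2 2, n ++ [q]) from by simp [pvGAbs, hc],
          show pvAbsorb (o, n) q = (PySem.Set.discard o q, n ++ [q]) from by simp [pvAbsorb, hq]]
      exact ih _ _ _ (rel_step R C g o q hrel hq)
    · have hc : ¬(0 ≤ q.1 ∧ q.1 < R ∧ 0 ≤ q.2 ∧ q.2 < C ∧ pvGG g q.1 q.2 = 1) := by
        intro hx; exact hq ((hrel q).mpr hx)
      simp only [List.foldl_cons]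
      rw [show pvGAbs R C (g, n) q = (g, n) from by simp [pvGAbs, hc],
          show pvAbsorb (o, n) q = (o, n) from by simp [pvAbsorb, hq]]
      exact ih g o n hrel

theorem nbr_fold_eq (R C x y : Int) (s : List (List Int) × List (Int × Int)) :
    pvDirs.foldl (pvGStep R C x y) s = (pvNbrs x y).foldl (pvGAbs R C) s := by
  simp only [pvDirs, pvNbrs, List.foldl, pvGStep]
  rw [show x + (-1 : Int) = x - 1 from by ring, show y + (-1 : Int) = y - 1 from by ring,
      show x + (0 : Int) = x from by ring, show y + (0 : Int) = y from by ring]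

theorem layer_corr (R C : Int) : ∀ (f : List (Int × Int)) (g : List (List Int))
    (o n : List (Int × Int)), pvRel R C g o →
    pvRel R C ((pvGLayer R C f (g, n)).1) ((pvLayerB f (o, n)).1) ∧
      (pvGLayer R C f (g, n)).2 = (pvLayerB f (o, n)).2 := by
  intro f
  induction f with
  | nil => intro g o n hrel; exact ⟨hrel, rfl⟩
  | cons p f ih =>
    intro g o n hrel
    simp only [pvGLayer, pvLayerB, List.foldl_cons]
    rw [nbr_fold_eq R C p.1 p.2 (g, n)]
    obtain ⟨hrel', heq⟩ := fold_abs_corr R C (pvNbrs p.1 p.2) g o n hrel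
    have hgs : (pvNbrs p.1 p.2).foldl (pvGAbs R C) (g, n)
        = (((pvNbrs p.1 p.2).foldl (pvGAbs R C) (g, n)).1, ((pvNbrs p.1 p.2).foldl (pvGAbs R C) (g, n)).2) := rfl
    have hss : (pvNbrs p.1 p.2).foldl pvAbsorb (o, n)
        = (((pvNbrs p.1 p.2).foldl pvAbsorb (o, n)).1, ((pvNbrs p.1 p.2).foldl (pvGAbs R C) (g, n)).2) := by
      rw [heq]
    rw [hgs, hss]
    exact ih _ _ _ hrel'

theorem any_iff (R C : Int) (g : List (List Int)) (o : List (Int × Int)) (h : pvRel R C g o) :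
    ((PySem.List.pyRange 0 R 1).any (fun i =>
        (PySem.List.pyRange 0 C 1).any (fun j => pvGG g i j == 1)) = true) ↔ o ≠ [] := by
  constructor
  · intro hx
    simp only [List.any_eq_true, PySem.List.mem_pyRange_one, beq_iff_eq] at hx
    obtain ⟨i, ⟨hi0, hiR⟩, j, ⟨hj0, hjC⟩, hv⟩ := hx
    exact List.ne_nil_of_mem ((h (i, j)).mpr ⟨hi0, hiR, hj0, hjC, hv⟩)
  · intro hx
    obtain ⟨p, hp⟩ := List.exists_mem_of_ne_nil o hx
    obtain ⟨h1, h2, h3, h4, h5⟩ := (h p).mp hp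
    simp only [List.any_eq_true, PySem.List.mem_pyRange_one, beq_iff_eq]
    exact ⟨p.1, ⟨h1, h2⟩, p.2, ⟨h3, h4⟩, h5⟩

theorem loops_eq (R C : Int) : ∀ (k : Nat) (o : List (Int × Int)) (g : List (List Int))
    (f : List (Int × Int)) (d : Int), o.length ≤ k → pvRel R C g o →
    (if (PySem.List.pyRange 0 R 1).any (fun i =>
          (PySem.List.pyRange 0 C 1).any (fun j => pvGG (pvGLoop R C f g d).2 i j == 1))
     then -1 else (pvGLoop R C f g d).1) = bfsAltLoop o f d := by
  intro k
  induction k using Nat.strong_induction_on with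
  | _ k ih =>
    intro o g f d hle hrel
    obtain ⟨hrel', heq⟩ := layer_corr R C f g o [] hrel
    rw [pvGLoop, bfsAltLoop]
    by_cases hn : (pvLayerB f (o, [])).2 = []
    · rw [dif_pos hn, dif_pos (heq.trans hn)]
      simp only
      by_cases ho : (pvLayerB f (o, [])).1 = []
      · rw [if_pos ho]
        rw [if_neg]
        intro hx
        exact ((any_iff R C _ _ hrel').mp hx) ho
      · rw [if_neg ho, if_pos ((any_iff R C _ _ hrel').mpr ho)]
    · rw [dif_neg hn, dif_neg (fun hx => hn (heq.symm.trans hx))]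
      have hcons := pvLayerB_len f (o, [])
      have hpos : 0 < ((pvLayerB f (o, [])).2).length := List.length_pos_iff.mpr hn
      have hklt : ((pvLayerB f (o, [])).1).length < k := by
        simp only [List.length_nil] at hcons; omega
      rw [heq]
      exact ih ((pvLayerB f (o, [])).1).length hklt ((pvLayerB f (o, [])).1)
        ((pvGLayer R C f (g, [])).1) ((pvLayerB f (o, [])).2) (d + 1) (le_refl _) hrel'


theorem mem_onesInit_inner (grid : List (List Int)) (i : Int) : ∀ (js : List Int)
    (acc : List (Int × Int)) (p : Int × Int),
    p ∈ js.foldl (fun a j => if pvGG grid i j = 1 then PySem.Set.add a (i, j) else a) acc ↔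
      p ∈ acc ∨ ∃ j ∈ js, p = (i, j) ∧ pvGG grid i j = 1 := by
  intro js
  induction js with
  | nil => intro acc p; simp
  | cons j js ih =>
    intro acc p
    by_cases h : pvGG grid i j = 1
    · simp only [List.foldl_cons, h, if_pos]
      rw [ih]
      simp only [PySem.Set.mem_add, List.mem_cons]
      constructor
      · rintro (⟨hp | hp⟩ | ⟨j', hj', hp, hv⟩)
        · exact Or.inl hp
        · exact Or.inr ⟨j, Or.inl rfl, hp, h⟩
        · exact Or.inr ⟨j', Or.inr hj', hp, hv⟩
      · rintro (hp | ⟨j', hj' | hj', hp, hv⟩)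
        · exact Or.inl (Or.inl hp)
        · exact Or.inl (Or.inr (by rw [hj'] at hp; exact hp))
        · exact Or.inr ⟨j', hj', hp, hv⟩
    · simp only [List.foldl_cons, h, ite_false]
      rw [ih]
      simp only [List.mem_cons]
      constructor
      · rintro (hp | ⟨j', hj', hp, hv⟩)
        · exact Or.inl hp
        · exact Or.inr ⟨j', Or.inr hj', hp, hv⟩
      · rintro (hp | ⟨j', hj' | hj', hp, hv⟩)
        · exact Or.inl hp
        · exact absurd (hj' ▸ hv) h
        · exact Or.inr ⟨j', hj', hp, hv⟩

theorem init_rel (R C : Int) (grid : List (List Int)) :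
    pvRel R C grid (pvOnesInit R C grid) := by
  intro p
  simp only [pvOnesInit]
  have houter : ∀ (is : List Int) (acc : List (Int × Int)),
      p ∈ is.foldl (fun acc i => (PySem.List.pyRange 0 C 1).foldl
        (fun a j => if pvGG grid i j = 1 then PySem.Set.add a (i, j) else a) acc) acc ↔
      p ∈ acc ∨ ∃ i ∈ is, ∃ j ∈ PySem.List.pyRange 0 C 1, p = (i, j) ∧ pvGG grid i j = 1 := by
    intro is
    induction is with
    | nil => intro acc; simp
    | cons i is ih =>
      intro acc
      simp only [List.foldl_cons, List.mem_cons]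
      rw [ih, mem_onesInit_inner]
      constructor
      · rintro ((hp | ⟨j, hj, hp, hv⟩) | ⟨i', hi', j, hj, hp, hv⟩)
        · exact Or.inl hp
        · exact Or.inr ⟨i, Or.inl rfl, j, hj, hp, hv⟩
        · exact Or.inr ⟨i', Or.inr hi', j, hj, hp, hv⟩
      · rintro (hp | ⟨i', hi' | hi', j, hj, hp, hv⟩)
        · exact Or.inl (Or.inl hp)
        · exact Or.inl (Or.inr ⟨j, hj, by rw [hi'] at hp hv; exact ⟨hp, hv⟩⟩)
        · exact Or.inr ⟨i', hi', j, hj, hp, hv⟩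
  rw [houter]
  simp only [List.not_mem_nil, false_or, PySem.List.mem_pyRange_one]
  constructor
  · rintro ⟨i, ⟨hi0, hiR⟩, j, ⟨hj0, hjC⟩, hp, hv⟩
    rw [hp]
    exact ⟨hi0, hiR, hj0, hjC, hv⟩
  · rintro ⟨h1, h2, h3, h4, h5⟩
    exact ⟨p.1, ⟨h1, h2⟩, p.2, ⟨h3, h4⟩, rfl, h5⟩

theorem bfs_spec' (R C : Int) (grid : List (List Int)) : bfs R C grid = bfs_alt R C grid := by
  simp only [bfs, bfs_alt]
  rw [seeds_eq R C grid,
      main_eq R C (pvOnes grid) grid (pvSeedsB R C grid) 0 (le_refl _)]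
  exact loops_eq R C (pvOnesInit R C grid).length (pvOnesInit R C grid) grid
    (pvSeedsB R C grid) 0 (le_refl _) (init_rel R C grid)

-- ===== VERDICT (by name: the statement is the Claim_ definition above) =====
theorem bfs_spec : Claim_equal_bfs := by
  unfold Claim_equal_bfs Spec_bfs
  intro R C grid _ _
  exact bfs_spec' R C grid
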